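-- pv_equiv track=rewrite | github.com/wanghaomingqaq/leetcode | 10-3考勤信息.py | oi
-- ===== SOURCE A (Python) =====
-- def oi(nums):
--     if nums.count('absent')>1:
--         return "false"
--     for i in range(len(nums)):
--         if len(nums)< 7:
--             break
--         new = nums[i:i+7]
--         if len(new)<7:
--             break
--         if new.count('present')<4:
--             return "false"
--     for j in range(len(nums)):
--         if len(nums)<2:
--             break
--         two = nums[j:j+2]
--         if len(two)<2:
--             break
--         if 'absent' not in two and 'present' not in two:
--             return "false"
--     return "true"
-- ===== SOURCE B (Python) =====
-- def oi(nums):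
--     if nums.count('absent') > 1:
--         return "false"
--     n = len(nums)
--     pre = [0]
--     c = 0
--     for x in nums:
--         c += x == 'present'
--         pre.append(c)
--     for i in range(n - 6):
--         if pre[i + 7] - pre[i] < 4:
--             return "false"
--     for j in range(n - 1):
--         a, b = nums[j], nums[j + 1]
--         if a != 'absent' and a != 'present' and b != 'absent' and b != 'present':
--             return "false"
--     return "true"
-- ===== Notes on version B (the rewrite author's own statement) =====
-- stated objective: alternative
-- what changed: Replaced A's per-window slice-and-count of 'present' by a prefix-sum array computed in one pass (each window check becomes a single subtraction) and A's pair slices by direct adjacent-element comparisons; it trades A's early exit before any scanning for an upfront linear prefix pass.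
import Mathlib
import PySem

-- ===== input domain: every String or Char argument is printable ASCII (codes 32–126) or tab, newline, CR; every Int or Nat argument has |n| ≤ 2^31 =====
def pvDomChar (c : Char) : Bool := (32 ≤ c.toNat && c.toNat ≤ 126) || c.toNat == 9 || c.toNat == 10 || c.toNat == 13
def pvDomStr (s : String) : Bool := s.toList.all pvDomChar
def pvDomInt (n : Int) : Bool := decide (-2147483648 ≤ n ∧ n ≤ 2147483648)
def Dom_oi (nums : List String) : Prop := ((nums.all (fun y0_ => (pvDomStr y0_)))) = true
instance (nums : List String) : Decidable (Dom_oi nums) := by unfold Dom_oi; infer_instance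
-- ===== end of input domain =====

-- B replaces A's per-window slice-and-count by a one-pass prefix-sum array (each window
-- check is one subtraction) and the pair slices by direct adjacent-element comparisons;
-- objective: alternative algorithm, same cost. Equivalence proved on all inputs.


-- ===== PORT A =====
-- first for-loop of A: sliding 7-windows, early break when len(nums)<7 or the slice is short
def oiLoop1 (nums : List String) : List Int → Option String
  | [] => none
  | i :: rest =>
    if (nums.length : Int) < 7 then none
    else
      let new := PySem.List.slice nums (some i) (some (i + 7))
      if (new.length : Int) < 7 then none
      else if PySem.List.count new "present" < 4 then some "false"
      else oiLoop1 nums rest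

-- second for-loop of A: adjacent pairs, early break when len(nums)<2 or the slice is short
def oiLoop2 (nums : List String) : List Int → Option String
  | [] => none
  | j :: rest =>
    if (nums.length : Int) < 2 then none
    else
      let two := PySem.List.slice nums (some j) (some (j + 2))
      if (two.length : Int) < 2 then none
      else if !(two.contains "absent") && !(two.contains "present") then some "false"
      else oiLoop2 nums rest

def oi (nums : List String) : String :=
  if PySem.List.count nums "absent" > 1 then "false"
  else
    match oiLoop1 nums (PySem.List.pyRange 0 (nums.length : Int) 1) with
    | some s => s
    | none =>
      match oiLoop2 nums (PySem.List.pyRange 0 (nums.length : Int) 1) with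
      | some s => s
      | none => "true"

-- ===== PORT B =====
-- B's window loop: one subtraction of prefix sums per window (indices are always in
-- range when called, so the getD default 0 is only a totality guard)
def oiAltWin (pre : List Int) : List Int → Option String
  | [] => none
  | i :: rest =>
    if PySem.List.pyGetD pre (i + 7) 0 - PySem.List.pyGetD pre i 0 < 4 then some "false"
    else oiAltWin pre rest

-- B's pair loop: direct adjacent-element comparisons (indices always in range; getD "" is a totality guard)
def oiAltPair (nums : List String) : List Int → Option String
  | [] => none
  | j :: rest =>
    let a := PySem.List.pyGetD nums j ""
    let b := PySem.List.pyGetD nums (j + 1) ""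
    if !(a == "absent") && !(a == "present") && !(b == "absent") && !(b == "present") then
      some "false"
    else oiAltPair nums rest

def oi_alt (nums : List String) : String :=
  if PySem.List.count nums "absent" > 1 then "false"
  else
    let n : Int := nums.length
    let pc := nums.foldl
      (fun (s : List Int × Int) x =>
        let c := s.2 + (if x == "present" then 1 else 0)
        (s.1 ++ [c], c)) ([0], 0)
    match oiAltWin pc.1 (PySem.List.pyRange 0 (n - 6) 1) with
    | some s => s
    | none =>
      match oiAltPair nums (PySem.List.pyRange 0 (n - 1) 1) with
      | some s => s
      | none => "true"

-- ===== PRECONDITION & SPEC =====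
def Spec_oi (nums : List String) (out : String) : Prop := out = oi_alt nums
instance (nums : List String) (out : String) : Decidable (Spec_oi nums out) := by unfold Spec_oi; infer_instance

-- ===== CLAIM (what is proved, stated in full; the proofs are below) =====
def Claim_equal_oi : Prop := ∀ (nums : List String), Dom_oi nums → Spec_oi nums (oi nums)

-- ===== LEMMAS AND PROOFS =====

-- A's window test, as a Bool predicate on the start index
def badWinA (nums : List String) (i : Int) : Bool :=
  PySem.List.count (PySem.List.slice nums (some i) (some (i + 7))) "present" < 4

-- A's pair test
def badPairA (nums : List String) (j : Int) : Bool :=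
  let two := PySem.List.slice nums (some j) (some (j + 2))
  !(two.contains "absent") && !(two.contains "present")

-- B's window test
def badWinB (pre : List Int) (i : Int) : Bool :=
  PySem.List.pyGetD pre (i + 7) 0 - PySem.List.pyGetD pre i 0 < 4

-- B's pair test
def badPairB (nums : List String) (j : Int) : Bool :=
  let a := PySem.List.pyGetD nums j ""
  let b := PySem.List.pyGetD nums (j + 1) ""
  !(a == "absent") && !(a == "present") && !(b == "absent") && !(b == "present")

lemma oiAltWin_eq (pre : List Int) (is : List Int) :
    oiAltWin pre is = if is.any (badWinB pre) then some "false" else none := by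
  induction is with
  | nil => rfl
  | cons i rest ih =>
    simp only [oiAltWin, List.any_cons, badWinB]
    by_cases h : PySem.List.pyGetD pre (i + 7) 0 - PySem.List.pyGetD pre i 0 < 4 <;>
      simp [h, ih]

lemma oiAltPair_eq (nums : List String) (is : List Int) :
    oiAltPair nums is = if is.any (badPairB nums) then some "false" else none := by
  induction is with
  | nil => rfl
  | cons j rest ih =>
    simp only [oiAltPair, List.any_cons, badPairB]
    by_cases h : (!(PySem.List.pyGetD nums j "" == "absent") &&
        !(PySem.List.pyGetD nums j "" == "present") &&
        !(PySem.List.pyGetD nums (j + 1) "" == "absent") &&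
        !(PySem.List.pyGetD nums (j + 1) "" == "present")) = true <;>
      simp [h, ih]

lemma slice_nat_add (xs : List String) (a k : Nat) :
    PySem.List.slice xs (some (a : Int)) (some ((a : Int) + (k : Int))) =
      (xs.drop a).take k :=
  PySem.List.slice_natCast_add xs a k

lemma loop1_go (nums : List String) (h7 : 7 ≤ nums.length) (a : Nat) :
    oiLoop1 nums (PySem.List.pyRange (a : Int) (nums.length : Int) 1) =
      if (PySem.List.pyRange (a : Int) ((nums.length : Int) - 6) 1).any (badWinA nums)
      then some "false" else none := by
  by_cases hlt : a < nums.length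
  · rw [PySem.List.pyRange_one_cons (by exact_mod_cast hlt)]
    simp only [oiLoop1]
    have h7' : ¬ ((nums.length : Int) < 7) := by omega
    rw [if_neg h7']
    have hslice : PySem.List.slice nums (some (a : Int)) (some ((a : Int) + 7)) =
        (nums.drop a).take 7 := by
      have := slice_nat_add nums a 7; norm_num at this ⊢; exact this
    by_cases hshort : nums.length < a + 7
    · -- slice is short: A breaks; B's range is empty
      have hlen : (((nums.drop a).take 7).length : Int) < 7 := by
        simp [List.length_take, List.length_drop]; omega
      rw [hslice, if_pos hlen]
      rw [PySem.List.pyRange_one_eq_nil (by omega)]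
      simp
    · rw [not_lt] at hshort
      have hlen : ¬ ((((nums.drop a).take 7).length : Int) < 7) := by
        simp [List.length_take, List.length_drop]; omega
      rw [hslice, if_neg hlen]
      rw [PySem.List.pyRange_one_cons (a := (a : Int)) (by omega)]
      simp only [List.any_cons]
      by_cases hbad : PySem.List.count ((nums.drop a).take 7) "present" < 4
      · rw [if_pos hbad]
        have : badWinA nums (a : Int) = true := by
          simp only [badWinA, hslice]; exact decide_eq_true hbad
        simp [this]
      · rw [if_neg hbad]
        have hb : badWinA nums (a : Int) = false := by
          simp only [badWinA, hslice]; exact decide_eq_false hbad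
        have := loop1_go nums h7 (a + 1)
        simp only [hb, Bool.false_or]
        simpa [Int.natCast_add] using this
  · rw [PySem.List.pyRange_one_eq_nil (by exact_mod_cast Nat.le_of_not_lt hlt),
      PySem.List.pyRange_one_eq_nil (by omega)]
    rfl
termination_by nums.length - a

lemma loop2_go (nums : List String) (h2 : 2 ≤ nums.length) (a : Nat) :
    oiLoop2 nums (PySem.List.pyRange (a : Int) (nums.length : Int) 1) =
      if (PySem.List.pyRange (a : Int) ((nums.length : Int) - 1) 1).any (badPairA nums)
      then some "false" else none := by
  by_cases hlt : a < nums.length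
  · rw [PySem.List.pyRange_one_cons (by exact_mod_cast hlt)]
    simp only [oiLoop2]
    have h2' : ¬ ((nums.length : Int) < 2) := by omega
    rw [if_neg h2']
    have hslice : PySem.List.slice nums (some (a : Int)) (some ((a : Int) + 2)) =
        (nums.drop a).take 2 := by
      have := slice_nat_add nums a 2; norm_num at this ⊢; exact this
    by_cases hshort : nums.length < a + 2
    · have hlen : (((nums.drop a).take 2).length : Int) < 2 := by
        simp [List.length_take, List.length_drop]; omega
      rw [hslice, if_pos hlen]
      rw [PySem.List.pyRange_one_eq_nil (by omega)]
      simp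
    · rw [not_lt] at hshort
      have hlen : ¬ ((((nums.drop a).take 2).length : Int) < 2) := by
        simp [List.length_take, List.length_drop]; omega
      rw [hslice, if_neg hlen]
      rw [PySem.List.pyRange_one_cons (a := (a : Int)) (by omega)]
      simp only [List.any_cons]
      by_cases hbad : (!(((nums.drop a).take 2).contains "absent") &&
          !(((nums.drop a).take 2).contains "present")) = true
      · rw [if_pos hbad]
        have : badPairA nums (a : Int) = true := by
          simp only [badPairA, hslice]; exact hbad
        simp [this]
      · rw [if_neg hbad]
        have hb : badPairA nums (a : Int) = false := by
          simp only [badPairA, hslice]; exact Bool.eq_false_iff.mpr hbad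
        have := loop2_go nums h2 (a + 1)
        simp only [hb, Bool.false_or]
        simpa [Int.natCast_add] using this
  · rw [PySem.List.pyRange_one_eq_nil (by exact_mod_cast Nat.le_of_not_lt hlt),
      PySem.List.pyRange_one_eq_nil (by omega)]
    rfl
termination_by nums.length - a

-- the indicator B adds for each element
def ind (x : String) : Int := if x == "present" then 1 else 0

-- the prefix list B builds
def preOf (nums : List String) : List Int :=
  (nums.foldl (fun (s : List Int × Int) x =>
    let c := s.2 + ind x
    (s.1 ++ [c], c)) ([0], 0)).1

lemma fold_spec (l : List String) (p0 : List Int) (c0 : Int) :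
    l.foldl (fun (s : List Int × Int) x =>
        let c := s.2 + ind x
        (s.1 ++ [c], c)) (p0, c0) =
      (p0 ++ (List.range l.length).map
          (fun k => c0 + ((l.take (k + 1)).count "present" : Int)),
        c0 + (l.count "present" : Int)) := by
  induction l generalizing p0 c0 with
  | nil => simp
  | cons x l ih =>
    simp only [List.foldl_cons]
    rw [ih, Prod.mk.injEq]
    constructor
    · rw [List.length_cons, List.range_succ_eq_map, List.map_cons, List.map_map,
        List.append_assoc]
      by_cases hx : x == "present" <;>
        simp [ind, hx, Function.comp, Nat.succ_eq_add_one, List.take_succ_cons,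
          List.count_cons] <;> intros <;> push_cast <;> ring
    · by_cases hx : x == "present" <;>
        simp [ind, hx, List.count_cons] <;> intros <;> push_cast <;> ring

lemma preOf_get (nums : List String) (k : Nat) (hk : k ≤ nums.length) :
    PySem.List.pyGetD (preOf nums) (k : Int) 0 =
      ((nums.take k).count "present" : Int) := by
  unfold preOf
  rw [fold_spec]
  rw [PySem.List.pyGetD_natCast]
  cases k with
  | zero => simp
  | succ j =>
    have hj : j < nums.length := by omega
    simp only [List.singleton_append, List.getD_cons_succ]
    rw [PySem.List.getD_map_range _ nums.length j 0 hj]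
    ring

lemma count_window (nums : List String) (k : Nat) (hk : k + 7 ≤ nums.length) :
    ((nums.take (k + 7)).count "present" : Int) - ((nums.take k).count "present" : Int)
      = (((nums.drop k).take 7).count "present" : Int) := by
  rw [List.take_add, List.count_append]
  push_cast; ring

lemma badWin_agree (nums : List String) (i : Int)
    (hi : i ∈ PySem.List.pyRange 0 ((nums.length : Int) - 6) 1) :
    badWinA nums i = badWinB (preOf nums) i := by
  rw [PySem.List.mem_pyRange_one] at hi
  obtain ⟨h0, hub⟩ := hi
  obtain ⟨k, hik⟩ : ∃ k : Nat, i = (k : Int) := ⟨i.toNat, by omega⟩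
  subst hik
  have hk7 : k + 7 ≤ nums.length := by omega
  have h7 : ((k : Int) + 7) = ((k + 7 : Nat) : Int) := by push_cast; ring
  rw [badWinA, badWinB, h7, preOf_get nums (k + 7) hk7, preOf_get nums k (by omega)]
  rw [count_window nums k hk7]
  rw [decide_eq_decide, PySem.List.count_eq]
  have hs : PySem.List.slice nums (some (k : Int)) (some ((k + 7 : Nat) : Int)) =
      (nums.drop k).take 7 := by
    have := slice_nat_add nums k 7; push_cast at this ⊢; exact this
  rw [hs]
  omega

lemma take_two_drop (nums : List String) (k : Nat) (hk : k + 2 ≤ nums.length) :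
    (nums.drop k).take 2 = [nums.getD k "", nums.getD (k + 1) ""] := by
  have h1 : k < nums.length := by omega
  have h2 : k + 1 < nums.length := by omega
  apply List.ext_getElem
  · simp [List.length_take, List.length_drop]; omega
  · intro n hn hn'
    simp only [List.length_take, List.length_drop] at hn
    have hn2 : n < 2 := by omega
    interval_cases n <;>
      simp [List.getElem_take, List.getElem_drop, List.getD_eq_getElem?_getD,
        h1, h2]

lemma badPair_agree (nums : List String) (j : Int)
    (hj : j ∈ PySem.List.pyRange 0 ((nums.length : Int) - 1) 1) :
    badPairA nums j = badPairB nums j := by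
  rw [PySem.List.mem_pyRange_one] at hj
  obtain ⟨h0, hub⟩ := hj
  obtain ⟨k, hik⟩ : ∃ k : Nat, j = (k : Int) := ⟨j.toNat, by omega⟩
  subst hik
  have hk2 : k + 2 ≤ nums.length := by omega
  have hs : PySem.List.slice nums (some (k : Int)) (some ((k : Int) + 2)) =
      (nums.drop k).take 2 := by
    have := slice_nat_add nums k 2; norm_num at this ⊢; exact this
  have h1 : ((k : Int) + 1) = ((k + 1 : Nat) : Int) := by push_cast; ring
  rw [badPairA, badPairB, hs, take_two_drop nums k hk2, h1,
    PySem.List.pyGetD_natCast, PySem.List.pyGetD_natCast]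
  simp only [List.contains_cons, List.contains_nil, Bool.or_false]
  rw [Bool.beq_comm (a := "absent") (b := nums.getD k ""),
    Bool.beq_comm (a := "present") (b := nums.getD k ""),
    Bool.beq_comm (a := "absent") (b := nums.getD (k + 1) ""),
    Bool.beq_comm (a := "present") (b := nums.getD (k + 1) "")]
  generalize (nums.getD k "" == "absent") = pA
  generalize (nums.getD k "" == "present") = pP
  generalize (nums.getD (k + 1) "" == "absent") = qA
  generalize (nums.getD (k + 1) "" == "present") = qP
  cases pA <;> cases pP <;> cases qA <;> cases qP <;> rfl

lemma loops_agree1 (nums : List String) :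
    oiLoop1 nums (PySem.List.pyRange 0 (nums.length : Int) 1) =
      oiAltWin (preOf nums) (PySem.List.pyRange 0 ((nums.length : Int) - 6) 1) := by
  rw [oiAltWin_eq]
  by_cases h7 : 7 ≤ nums.length
  · have := loop1_go nums h7 0
    simp only [Nat.cast_zero] at this
    rw [this]
    rw [PySem.List.any_congr_mem (fun i hi => badWin_agree nums i hi)]
  · rw [PySem.List.pyRange_one_eq_nil (a := (0:Int)) (b := (nums.length : Int) - 6)
      (by omega)]
    simp only [List.any_nil, if_neg Bool.false_ne_true]
    cases hn : nums.length with
    | zero =>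
      rw [PySem.List.pyRange_one_eq_nil (by omega)]; rfl
    | succ m =>
      rw [PySem.List.pyRange_one_cons (by omega)]
      simp only [oiLoop1]
      rw [if_pos (by omega)]

lemma loops_agree2 (nums : List String) :
    oiLoop2 nums (PySem.List.pyRange 0 (nums.length : Int) 1) =
      oiAltPair nums (PySem.List.pyRange 0 ((nums.length : Int) - 1) 1) := by
  rw [oiAltPair_eq]
  by_cases h2 : 2 ≤ nums.length
  · have := loop2_go nums h2 0
    simp only [Nat.cast_zero] at this
    rw [this]
    rw [PySem.List.any_congr_mem (fun j hj => badPair_agree nums j hj)]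
  · rw [PySem.List.pyRange_one_eq_nil (a := (0:Int)) (b := (nums.length : Int) - 1)
      (by omega)]
    simp only [List.any_nil, if_neg Bool.false_ne_true]
    cases hn : nums.length with
    | zero =>
      rw [PySem.List.pyRange_one_eq_nil (by omega)]; rfl
    | succ m =>
      rw [PySem.List.pyRange_one_cons (by omega)]
      simp only [oiLoop2]
      rw [if_pos (by omega)]

-- ===== VERDICT =====
theorem oi_spec : Claim_equal_oi := by
  intro nums _
  unfold Spec_oi oi oi_alt
  by_cases habs : PySem.List.count nums "absent" > 1
  · rw [if_pos habs, if_pos habs]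
  · rw [if_neg habs, if_neg habs]
    simp only [preOf] at *
    rw [show (nums.foldl (fun (s : List Int × Int) x =>
        (s.1 ++ [s.2 + (if x == "present" then 1 else 0)],
          s.2 + (if x == "present" then 1 else 0))) ([0], 0)).1 = preOf nums from rfl]
    rw [← loops_agree1 nums, ← loops_agree2 nums]
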